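-- pv_equiv track=rewrite | github.com/zhou-lab/labtools | pyutils/wzcore.py | uniquify
-- ===== SOURCE A (Python) =====
-- def uniquify(seq):
--
--     seq2 = []
--     item2ind = {}
--     for i in seq:
--         if i not in item2ind:
--             seq2.append(i)
--             item2ind[i] = 1
--         else:
--             seq2.append(i+str(item2ind[i]))
--             item2ind[i] += 1
--
--     return seq2
-- ===== SOURCE B (Python) =====
-- def uniquify(seq):
--     # group positions by value, then write results back by position
--     xs = list(seq)
--     groups = {}
--     for i, v in enumerate(xs):
--         groups.setdefault(v, []).append(i)
--     res = [""] * len(xs)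
--     for v, ps in groups.items():
--         for j, p in enumerate(ps):
--             res[p] = v if j == 0 else v + str(j)
--     return res
-- ===== Notes on version B (the rewrite author's own statement) =====
-- stated objective: alternative
-- what changed: Instead of A's single left-to-right pass carrying a running per-value counter, B first builds an index from each value to the ordered list of its positions, then allocates the output and fills it group by group, writing the j-th occurrence of a value (with suffix str(j) for j>=1) directly at its original position.
import Mathlib
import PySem

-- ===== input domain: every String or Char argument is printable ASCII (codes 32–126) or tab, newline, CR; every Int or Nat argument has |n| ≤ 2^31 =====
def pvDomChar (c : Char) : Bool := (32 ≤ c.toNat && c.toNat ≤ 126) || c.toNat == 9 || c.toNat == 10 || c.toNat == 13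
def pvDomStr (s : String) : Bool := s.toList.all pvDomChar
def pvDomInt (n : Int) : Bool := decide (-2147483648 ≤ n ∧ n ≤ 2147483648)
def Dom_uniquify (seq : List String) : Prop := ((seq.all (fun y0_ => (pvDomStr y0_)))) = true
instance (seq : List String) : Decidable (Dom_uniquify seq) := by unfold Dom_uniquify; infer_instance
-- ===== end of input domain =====

-- B replaces A's one-pass running-counter scan by a group-by-position index: it maps each value to its
-- ordered occurrence positions, then fills a preallocated result group by group (alternative, not faster).

-- ===== PORT A =====
def uniquify (seq : List String) : List String :=
  (seq.foldl
    (fun (st : List String × PySem.Dict String Int) i =>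
      match st.2.get? i with
      | none => (st.1 ++ [i], st.2.insert i 1)
      | some c => (st.1 ++ [i ++ PySem.Int.toStr c], st.2.insert i (c + 1)))
    ([], PySem.Dict.empty)).1

-- ===== PORT B =====
-- indices come from enumerate, hence nonnegative and in range: Nat indexing with List.set is exact here
def uniquify_alt (seq : List String) : List String :=
  let groups : PySem.Dict String (List Nat) :=
    seq.zipIdx.foldl (fun d p => d.modify p.1 [] (fun l => l ++ [p.2])) PySem.Dict.empty
  groups.items.foldl
    (fun res g =>
      g.2.zipIdx.foldl
        (fun r q => r.set q.1 (if q.2 = 0 then g.1 else g.1 ++ PySem.Int.toStr (q.2 : Int))) res)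
    (seq.map (fun _ => ""))

-- ===== PRECONDITION & SPEC =====
def Spec_uniquify (seq : List String) (out : List String) : Prop := out = uniquify_alt seq
instance (seq : List String) (out : List String) : Decidable (Spec_uniquify seq out) := by unfold Spec_uniquify; infer_instance

-- ===== CLAIM (what is proved, stated in full; the proofs are below) =====
def Claim_equal_uniquify : Prop := ∀ (seq : List String), Dom_uniquify seq → Spec_uniquify seq (uniquify seq)

-- ===== LEMMAS AND PROOFS =====

-- the suffixed form of value v's occurrence number c
def uqG (v : String) (c : Nat) : String := if c = 0 then v else v ++ PySem.Int.toStr (c : Int)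

-- the common reference result: element at position i becomes uqG seq[i] (count of seq[i] before i)
def uqT (seq : List String) : List String :=
  seq.zipIdx.map (fun q => uqG q.1 ((seq.take q.2).count q.1))

-- ordered occurrence positions of v in seq
def uqPos (seq : List String) (v : String) : List Nat :=
  (seq.zipIdx.filter (fun p => p.1 == v)).map (·.2)

-- A-side reference: process rest, having already seen pre
def uqGo (pre : List String) : List String → List String
  | [] => []
  | v :: rest => uqG v (pre.count v) :: uqGo (pre ++ [v]) rest

theorem uqA_eq_go : ∀ (rest acc : List String) (d : PySem.Dict String Int) (pre : List String),
    (∀ v, d.get? v = if pre.count v = 0 then none else some ((pre.count v : Int))) →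
    (rest.foldl
      (fun (st : List String × PySem.Dict String Int) i =>
        match st.2.get? i with
        | none => (st.1 ++ [i], st.2.insert i 1)
        | some c => (st.1 ++ [i ++ PySem.Int.toStr c], st.2.insert i (c + 1)))
      (acc, d)).1 = acc ++ uqGo pre rest := by
  intro rest
  induction rest with
  | nil => intro acc d pre _; simp [uqGo]
  | cons v rest ih =>
    intro acc d pre hinv
    rw [List.foldl_cons]
    by_cases h0 : pre.count v = 0
    · have hd : d.get? v = none := by rw [hinv v]; simp [h0]
      simp only [hd]
      have hinv' : ∀ w, (d.insert v 1).get? w =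
          if (pre ++ [v]).count w = 0 then none else some (((pre ++ [v]).count w : Int)) := by
        intro w
        rw [PySem.Dict.get?_insert]
        by_cases hw : w = v
        · subst hw; simp [List.count_append, h0]
        · simp [hw, List.count_append, hinv w, Ne.symm hw]
      rw [ih (acc ++ [v]) _ (pre ++ [v]) hinv']
      simp [uqGo, uqG, h0]
    · have hd : d.get? v = some ((pre.count v : Int)) := by rw [hinv v]; simp [h0]
      simp only [hd]
      have hinv' : ∀ w, (d.insert v ((pre.count v : Int) + 1)).get? w =
          if (pre ++ [v]).count w = 0 then none else some (((pre ++ [v]).count w : Int)) := by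
        intro w
        rw [PySem.Dict.get?_insert]
        by_cases hw : w = v
        · subst hw; simp [List.count_append]
        · simp [hw, List.count_append, hinv w, Ne.symm hw]
      rw [ih (acc ++ [v ++ PySem.Int.toStr ((pre.count v : Int))]) _ (pre ++ [v]) hinv']
      simp [uqGo, uqG, h0]

theorem uqGo_eq_map : ∀ (rest pre full : List String), full = pre ++ rest →
    uqGo pre rest = (rest.zipIdx pre.length).map (fun q => uqG q.1 ((full.take q.2).count q.1)) := by
  intro rest
  induction rest with
  | nil => intro pre full h; simp [uqGo]
  | cons v rest ih =>
    intro pre full h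
    rw [List.zipIdx_cons, List.map_cons, uqGo]
    have h1 : full.take pre.length = pre := by
      subst h; rw [List.take_left]
    congr 1
    · simp [h1]
    · rw [ih (pre ++ [v]) full (by simp [h])]
      simp

theorem uqA_eq_T (seq : List String) : uniquify seq = uqT seq := by
  rw [uniquify, uqT]
  rw [uqA_eq_go seq [] PySem.Dict.empty [] (by intro v; simp [PySem.Dict.get?_empty])]
  rw [uqGo_eq_map seq [] seq (by simp)]
  simp

-- occurrence positions grow by one slot when an element is appended
theorem uqPos_append (seq : List String) (x v : String) :
    uqPos (seq ++ [x]) v = uqPos seq v ++ (if x == v then [seq.length] else []) := by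
  unfold uqPos
  rw [List.zipIdx_append, List.filter_append, List.map_append]
  congr 1
  by_cases hx : x == v
  · simp [List.zipIdx_cons, hx]
  · simp [List.zipIdx_cons, hx]

theorem uqPos_length (seq : List String) (v : String) : (uqPos seq v).length = seq.count v := by
  induction seq using List.reverseRecOn with
  | nil => simp [uqPos]
  | append_singleton seq x ih =>
    rw [uqPos_append, List.length_append, ih, List.count_append]
    by_cases hx : x == v
    · simp [List.count_singleton, hx]
    · simp [List.count_singleton, hx]

theorem uqPos_spec (seq : List String) (v : String) : ∀ j p, (uqPos seq v)[j]? = some p →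
    seq[p]? = some v ∧ j = (seq.take p).count v := by
  induction seq using List.reverseRecOn with
  | nil => intro j p h; simp [uqPos] at h
  | append_singleton seq x ih =>
    intro j p h
    rw [uqPos_append] at h
    by_cases hj : j < (uqPos seq v).length
    · rw [List.getElem?_append_left hj] at h
      obtain ⟨h1, h2⟩ := ih j p h
      have hp : p < seq.length := (List.getElem?_eq_some_iff.mp h1).1
      constructor
      · rw [List.getElem?_append_left hp]; exact h1
      · rw [List.take_append, Nat.sub_eq_zero_of_le (Nat.le_of_lt hp)]
        simpa using h2
    · rw [List.getElem?_append_right (Nat.le_of_not_lt hj)] at h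
      by_cases hx : x == v
      · simp only [hx, if_true] at h
        have hxv : x = v := by simpa using hx
        have hj0 : j - (uqPos seq v).length = 0 := by
          by_contra hne
          rcases Nat.exists_eq_succ_of_ne_zero hne with ⟨k, hk⟩
          simp [hk] at h
        have hjlen : j = (uqPos seq v).length := by omega
        have hp : p = seq.length := by
          simp [hj0] at h; omega
        subst hp
        constructor
        · rw [List.getElem?_concat_length]; rw [hxv]
        · rw [List.take_left, hjlen, uqPos_length]
      · simp [hx] at h

theorem uqPos_mem (seq : List String) (v : String) (p : Nat) (hp : p < seq.length)
    (hv : seq[p]? = some v) : p ∈ uqPos seq v := by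
  induction seq using List.reverseRecOn with
  | nil => simp at hp
  | append_singleton seq x ih =>
    rw [uqPos_append]
    by_cases hlt : p < seq.length
    · rw [List.getElem?_append_left hlt] at hv
      exact List.mem_append_left _ (ih hlt hv)
    · have hp' : p = seq.length := by
        rw [List.length_append, List.length_singleton] at hp; omega
      subst hp'
      rw [List.getElem?_concat_length] at hv
      have : x = v := by simpa using hv
      simp [this]

theorem uqPos_mem_val (seq : List String) (v : String) (p : Nat) (hp : p ∈ uqPos seq v) :
    seq[p]? = some v := by
  obtain ⟨j, hj⟩ := List.mem_iff_getElem?.mp hp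
  exact (uqPos_spec seq v j p hj).1

theorem uqPos_nodup (seq : List String) (v : String) : (uqPos seq v).Nodup := by
  induction seq using List.reverseRecOn with
  | nil => simp [uqPos]
  | append_singleton seq x ih =>
    rw [uqPos_append]
    by_cases hx : x == v
    · simp only [hx, if_true]
      refine List.Nodup.append ih (List.nodup_singleton _) ?_
      intro p hp hq
      have := uqPos_mem_val seq v p hp
      have hlt : p < seq.length := (List.getElem?_eq_some_iff.mp this).1
      simp at hq
      omega
    · simp [hx, ih]

-- the groups dict of port B
theorem groups_items (seq : List String) :
    (seq.zipIdx.foldl (fun d p => d.modify p.1 [] (fun l => l ++ [p.2])) PySem.Dict.empty).items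
      = (PySem.Set.ofList seq).map (fun v => (v, uqPos seq v)) := by
  have hnd : (seq.zipIdx.foldl (fun d p => d.modify p.1 [] (fun l => l ++ [p.2]))
      PySem.Dict.empty).keys.Nodup := by
    exact PySem.Dict.nodup_keys_foldl_modify_key seq.zipIdx Prod.fst []
      (fun _ p => fun l => l ++ [p.2]) PySem.Dict.empty (by simp [PySem.Dict.keys_empty])
  rw [PySem.Dict.items_eq_map_keys _ hnd []]
  have hkeys : (seq.zipIdx.foldl (fun d p => d.modify p.1 [] (fun l => l ++ [p.2]))
      PySem.Dict.empty).keys = PySem.Set.ofList seq := by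
    rw [PySem.Dict.keys_foldl_modify_key seq.zipIdx Prod.fst []
      (fun _ p => fun l => l ++ [p.2]) PySem.Dict.empty]
    rw [List.zipIdx_map_fst 0 seq]
    rfl
  rw [hkeys]
  have hget : ∀ v, (seq.zipIdx.foldl (fun d p => d.modify p.1 [] (fun l => l ++ [p.2]))
      PySem.Dict.empty).getD v [] = uqPos seq v := by
    intro v
    rw [PySem.Dict.getD_foldl_modify_append]
    simp [PySem.Dict.getD_empty, uqPos]
  simp only [hget]

-- the write passes preserve the result length
theorem foldl_len {γ : Type} (l : List γ) (f : List String → γ → List String)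
    (hf : ∀ r x, (f r x).length = r.length) : ∀ (res : List String),
    (l.foldl f res).length = res.length := by
  induction l with
  | nil => intro res; rfl
  | cons x l ih => intro res; rw [List.foldl_cons, ih, hf]

-- a group's inner write loop leaves positions outside its list unchanged
theorem inner_untouched (v : String) : ∀ (ps : List Nat) (j0 : Nat) (res : List String) (i : Nat),
    i ∉ ps →
    ((ps.zipIdx j0).foldl
      (fun r q => r.set q.1 (if q.2 = 0 then v else v ++ PySem.Int.toStr (q.2 : Int))) res)[i]?
      = res[i]? := by
  intro ps
  induction ps with
  | nil => intro j0 res i _; rfl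
  | cons p rest ih =>
    intro j0 res i hi
    rw [List.zipIdx_cons, List.foldl_cons]
    rw [ih (j0 + 1) _ i (fun h => hi (List.mem_cons_of_mem _ h))]
    exact List.getElem?_set_ne (fun h => hi (by rw [← h]; exact List.mem_cons_self))

-- the inner write loop writes uqG v (j0 + j) at the j-th listed position
theorem inner_touched (v : String) : ∀ (ps : List Nat) (j0 : Nat) (res : List String) (i j : Nat),
    ps.Nodup → ps[j]? = some i → i < res.length →
    ((ps.zipIdx j0).foldl
      (fun r q => r.set q.1 (if q.2 = 0 then v else v ++ PySem.Int.toStr (q.2 : Int))) res)[i]?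
      = some (uqG v (j0 + j)) := by
  intro ps
  induction ps with
  | nil => intro j0 res i j _ h _; simp at h
  | cons p rest ih =>
    intro j0 res i j hnd hj hi
    rw [List.nodup_cons] at hnd
    rw [List.zipIdx_cons, List.foldl_cons]
    by_cases hpi : p = i
    · subst hpi
      have hrest : p ∉ rest := hnd.1
      have hj0 : j = 0 := by
        cases j with
        | zero => rfl
        | succ k =>
          exfalso
          rw [List.getElem?_cons_succ] at hj
          exact hrest (List.mem_of_getElem? hj)
      subst hj0
      rw [inner_untouched v rest (j0 + 1) _ p hrest]
      rw [List.getElem?_set_self (by simpa using hi)]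
      simp [uqG]
    · have hj' : ∃ k, j = k + 1 := by
        cases j with
        | zero => exfalso; exact hpi (by simpa using hj)
        | succ k => exact ⟨k, rfl⟩
      obtain ⟨k, rfl⟩ := hj'
      rw [List.getElem?_cons_succ] at hj
      rw [ih (j0 + 1) _ i k hnd.2 hj (by simpa using hi)]
      have : j0 + 1 + k = j0 + (k + 1) := by omega
      rw [this]

-- the outer write loop leaves positions belonging to none of its groups unchanged
theorem outer_untouched : ∀ (gs : List (String × List Nat)) (res : List String) (i : Nat),
    (∀ g ∈ gs, i ∉ g.2) →
    (gs.foldl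
      (fun res g => g.2.zipIdx.foldl
        (fun r q => r.set q.1 (if q.2 = 0 then g.1 else g.1 ++ PySem.Int.toStr (q.2 : Int))) res)
      res)[i]? = res[i]? := by
  intro gs
  induction gs with
  | nil => intro res i _; rfl
  | cons g gs ih =>
    intro res i hi
    rw [List.foldl_cons]
    rw [ih _ i (fun g' hg' => hi g' (List.mem_cons_of_mem _ hg'))]
    exact inner_untouched g.1 g.2 0 res i (hi g List.mem_cons_self)

theorem uqB_eq_T (seq : List String) : uniquify_alt seq = uqT seq := by
  apply List.ext_getElem?
  intro i
  simp only [uniquify_alt]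
  rw [groups_items]
  have hinner : ∀ (g : String × List Nat) (r : List String),
      (g.2.zipIdx.foldl
        (fun r q => r.set q.1 (if q.2 = 0 then g.1 else g.1 ++ PySem.Int.toStr (q.2 : Int)))
        r).length = r.length := by
    intro g r
    exact foldl_len _ _ (fun r q => List.length_set) r
  by_cases hi : i < seq.length
  · have hv : seq[i]? = some seq[i] := List.getElem?_eq_getElem hi
    have hmem : seq[i] ∈ PySem.Set.ofList seq := by
      rw [PySem.Set.mem_ofList]
      exact List.getElem_mem hi
    obtain ⟨V1, V2, hV⟩ := List.append_of_mem hmem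
    have hnd : (PySem.Set.ofList seq).Nodup := PySem.Set.nodup_ofList seq
    rw [hV, List.nodup_append] at hnd
    have hnotV2 : seq[i] ∉ V2 := (List.nodup_cons.mp hnd.2.1).1
    have hnotV1 : seq[i] ∉ V1 := fun h => hnd.2.2 _ h _ List.mem_cons_self rfl
    rw [hV, List.map_append, List.map_cons, List.foldl_append, List.foldl_cons]
    have hres1len :
        ((V1.map (fun v => (v, uqPos seq v))).foldl
          (fun res g => g.2.zipIdx.foldl
            (fun r q => r.set q.1 (if q.2 = 0 then g.1 else g.1 ++ PySem.Int.toStr (q.2 : Int)))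
            res)
          (seq.map (fun _ => ""))).length = seq.length := by
      rw [foldl_len _ _ (fun r g => hinner g r)]
      simp
    obtain ⟨j, hj⟩ := List.mem_iff_getElem?.mp (uqPos_mem seq seq[i] i hi hv)
    rw [outer_untouched _ _ i ?_]
    · rw [inner_touched seq[i] (uqPos seq seq[i]) 0 _ i j (uqPos_nodup seq seq[i]) hj
        (by rw [hres1len]; exact hi)]
      have hjc : j = (seq.take i).count seq[i] := (uqPos_spec seq seq[i] j i hj).2
      rw [uqT]
      rw [List.getElem?_map, List.getElem?_zipIdx, hv]
      simp [hjc]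
    · intro g hg hmemg
      obtain ⟨w, hw, hgw⟩ := List.mem_map.mp hg
      subst hgw
      have := uqPos_mem_val seq w i hmemg
      rw [hv] at this
      exact hnotV2 (by rw [Option.some_inj.mp this]; exact hw)
  · have hlenL :
        (((PySem.Set.ofList seq).map (fun v => (v, uqPos seq v))).foldl
          (fun res g => g.2.zipIdx.foldl
            (fun r q => r.set q.1 (if q.2 = 0 then g.1 else g.1 ++ PySem.Int.toStr (q.2 : Int)))
            res)
          (seq.map (fun _ => ""))).length = seq.length := by
      rw [foldl_len _ _ (fun r g => hinner g r)]
      simp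
    rw [List.getElem?_eq_none (by rw [hlenL]; omega), uqT,
      List.getElem?_eq_none (by simp; omega)]

-- ===== VERDICT (by name: the statement is the Claim_ definition above) =====
theorem uniquify_spec : Claim_equal_uniquify := by
  intro seq _
  show uniquify seq = uniquify_alt seq
  rw [uqA_eq_T, uqB_eq_T]
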